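-- pv_equiv track=rewrite | github.com/jorgecif/clavesscout | app.py | text_to_eucalipto
-- ===== SOURCE A (Python) =====
-- eucalipto_dict = {
--     'E': '1',
--     'U': '2',
--     'C': '3',
--     'A': '4',
--     'L': '5',
--     'I': '6',
--     'P': '7',
--     'T': '8',
--     'O': '9',
--     ' ': '/',
-- }
--
-- def text_to_eucalipto(text_to_encode):
--     text_encoded = ''
--     for char in text_to_encode:
--         if char.upper() in eucalipto_dict:
--             text_encoded += eucalipto_dict[char.upper()]
--         else:
--             text_encoded += char.upper()
--     return text_encoded
-- ===== SOURCE B (Python) =====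
-- eucalipto_dict = {
--     'E': '1',
--     'U': '2',
--     'C': '3',
--     'A': '4',
--     'L': '5',
--     'I': '6',
--     'P': '7',
--     'T': '8',
--     'O': '9',
--     ' ': '/',
-- }
--
-- def text_to_eucalipto(text_to_encode):
--     # Staged whole-string passes: uppercase once, then one full-string
--     # str.replace pass per mapping entry.  Correct because no replacement
--     # value ('1'-'9','/') is itself a key, so later passes never touch the
--     # output of earlier ones.
--     result = text_to_encode.upper()
--     for key, value in eucalipto_dict.items():
--         result = result.replace(key, value)
--     return result
-- ===== Notes on version B (the rewrite author's own statement) =====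
-- stated objective: faster
-- what changed: Replaces A's single per-character Python loop with dict membership test and string concatenation by staged whole-string passes: one .upper() pass followed by one full-string str.replace pass per mapping entry, sound because no replacement value is itself a key.
import Mathlib
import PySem

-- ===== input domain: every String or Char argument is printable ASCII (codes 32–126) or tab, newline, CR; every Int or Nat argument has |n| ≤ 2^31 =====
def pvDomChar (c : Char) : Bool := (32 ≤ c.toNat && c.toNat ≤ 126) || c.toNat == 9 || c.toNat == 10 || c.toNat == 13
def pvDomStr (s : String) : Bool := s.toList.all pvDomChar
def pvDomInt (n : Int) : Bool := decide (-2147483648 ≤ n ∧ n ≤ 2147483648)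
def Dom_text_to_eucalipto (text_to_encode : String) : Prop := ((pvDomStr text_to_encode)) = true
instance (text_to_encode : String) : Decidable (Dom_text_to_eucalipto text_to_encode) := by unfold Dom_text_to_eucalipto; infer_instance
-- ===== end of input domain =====

-- B replaces A's per-character loop by staged whole-string passes: .upper() once, then one str.replace pass per mapping entry (alternative decomposition; correct because no replacement value is itself a key).

-- ===== PORT A =====
def eucaliptoDict : PySem.Dict Char Char :=
  ⟨[('E','1'),('U','2'),('C','3'),('A','4'),('L','5'),('I','6'),('P','7'),('T','8'),('O','9'),(' ','/')]⟩

def text_to_eucalipto (text_to_encode : String) : String :=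
  String.ofList <| text_to_encode.toList.foldl (fun acc c =>
    match eucaliptoDict.get? (PySem.Chars.upperChar c) with
    | some v => acc ++ [v]
    | none   => acc ++ [PySem.Chars.upperChar c]) []

-- ===== PORT B =====
def text_to_eucalipto_alt (text_to_encode : String) : String :=
  (eucaliptoDict.items).foldl
    (fun result kv => PySem.Str.replace result (String.ofList [kv.1]) (String.ofList [kv.2]))
    (PySem.Str.upper text_to_encode)

-- ===== PRECONDITION & SPEC =====
def Spec_text_to_eucalipto (text_to_encode : String) (out : String) : Prop := out = text_to_eucalipto_alt text_to_encode
instance (text_to_encode : String) (out : String) : Decidable (Spec_text_to_eucalipto text_to_encode out) := by unfold Spec_text_to_eucalipto; infer_instance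

-- ===== CLAIM (what is proved, stated in full; the proofs are below) =====
def Claim_equal_text_to_eucalipto : Prop := ∀ (text_to_encode : String), Dom_text_to_eucalipto text_to_encode → Spec_text_to_eucalipto text_to_encode (text_to_eucalipto text_to_encode)

-- ===== LEMMAS AND PROOFS =====

-- one single-character substitution, as a function on characters
def pvSub (k v c : Char) : Char := if c = k then v else c

theorem pvSub_neg {k v c : Char} (h : ¬ c = k) : pvSub k v c = c := if_neg h

-- single-character str.replace is a map of pvSub over the characters
theorem replace_go_single (k v : Char) :
    ∀ (l : List Char) (fuel : Nat) (acc : List Char), l.length ≤ fuel →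
      PySem.Chars.replace.go [k] [v] fuel l acc = acc.reverse ++ l.map (pvSub k v) := by
  intro l
  induction l with
  | nil =>
      intro fuel acc _
      cases fuel <;> simp [PySem.Chars.replace.go]
  | cons c t ih =>
      intro fuel acc h
      cases fuel with
      | zero => simp at h
      | succ n =>
        simp only [PySem.Chars.replace.go, List.isPrefixOf]
        by_cases hck : k = c
        · subst hck
          simp [pvSub, ih n (v :: acc) (by simpa using h)]
        · have hb : (k == c) = false := by simpa using hck
          have hne : ¬ c = k := fun hh => hck hh.symm
          simp [pvSub, hb, hne, ih n (c :: acc) (by simpa using h)]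

theorem replace_single (k v : Char) (l : List Char) :
    PySem.Chars.replace l [k] [v] = l.map (pvSub k v) := by
  simpa [PySem.Chars.replace] using replace_go_single k v l l.length [] (Nat.le_refl _)

-- on a single character, the ten staged substitutions equal A's dictionary lookup
theorem pointwise_eq (d : Char) :
    pvSub ' ' '/' (pvSub 'O' '9' (pvSub 'T' '8' (pvSub 'P' '7' (pvSub 'I' '6'
      (pvSub 'L' '5' (pvSub 'A' '4' (pvSub 'C' '3' (pvSub 'U' '2' (pvSub 'E' '1' d)))))))))
    = (match eucaliptoDict.get? d with | some v => v | none => d) := by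
  by_cases hE : d = 'E'; · subst hE; decide
  by_cases hU : d = 'U'; · subst hU; decide
  by_cases hC : d = 'C'; · subst hC; decide
  by_cases hA : d = 'A'; · subst hA; decide
  by_cases hL : d = 'L'; · subst hL; decide
  by_cases hI : d = 'I'; · subst hI; decide
  by_cases hP : d = 'P'; · subst hP; decide
  by_cases hT : d = 'T'; · subst hT; decide
  by_cases hO : d = 'O'; · subst hO; decide
  by_cases hS : d = ' '; · subst hS; decide
  have hfind : List.find? (fun p => p.1 == d) eucaliptoDict.items = none := by
    rw [List.find?_eq_none]
    intro x hx
    simp only [eucaliptoDict, List.mem_cons, List.not_mem_nil, or_false] at hx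
    rcases hx with rfl|rfl|rfl|rfl|rfl|rfl|rfl|rfl|rfl|rfl <;> simp only [beq_iff_eq]
    · exact fun h => hE h.symm
    · exact fun h => hU h.symm
    · exact fun h => hC h.symm
    · exact fun h => hA h.symm
    · exact fun h => hL h.symm
    · exact fun h => hI h.symm
    · exact fun h => hP h.symm
    · exact fun h => hT h.symm
    · exact fun h => hO h.symm
    · exact fun h => hS h.symm
  have hget : eucaliptoDict.get? d = none := by
    simp only [PySem.Dict.get?, hfind, Option.map_none]
  rw [pvSub_neg hE, pvSub_neg hU, pvSub_neg hC, pvSub_neg hA, pvSub_neg hL,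
      pvSub_neg hI, pvSub_neg hP, pvSub_neg hT, pvSub_neg hO, pvSub_neg hS, hget]

-- the ten staged map passes over the uppercased list equal A's single lookup map
theorem staged_eq (l : List Char) :
    ((((((((((l.map PySem.Chars.upperChar).map (pvSub 'E' '1')).map (pvSub 'U' '2')).map
      (pvSub 'C' '3')).map (pvSub 'A' '4')).map (pvSub 'L' '5')).map (pvSub 'I' '6')).map
      (pvSub 'P' '7')).map (pvSub 'T' '8')).map (pvSub 'O' '9')).map (pvSub ' ' '/')
    = l.map (fun c =>
        match eucaliptoDict.get? (PySem.Chars.upperChar c) with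
        | some v => v
        | none   => PySem.Chars.upperChar c) := by
  induction l with
  | nil => rfl
  | cons c t ih =>
      simp only [List.map_cons]
      rw [ih, pointwise_eq]

-- ===== VERDICT (by name: the statement is the Claim_ definition above) =====
theorem text_to_eucalipto_spec : Claim_equal_text_to_eucalipto := by
  intro s _
  unfold Spec_text_to_eucalipto text_to_eucalipto text_to_eucalipto_alt
  rw [← String.toList_inj]
  have hstep : ∀ (acc : List Char) c,
      (match eucaliptoDict.get? (PySem.Chars.upperChar c) with
       | some v => acc ++ [v]
       | none   => acc ++ [PySem.Chars.upperChar c])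
      = acc ++ [(match eucaliptoDict.get? (PySem.Chars.upperChar c) with
                 | some v => v
                 | none   => PySem.Chars.upperChar c)] := by
    intro acc c
    cases eucaliptoDict.get? (PySem.Chars.upperChar c) <;> rfl
  simp only [hstep, PySem.List.foldl_append_singleton_eq_map, List.nil_append, String.toList_ofList]
  have hitems : eucaliptoDict.items
      = [('E','1'),('U','2'),('C','3'),('A','4'),('L','5'),('I','6'),('P','7'),('T','8'),('O','9'),(' ','/')] := rfl
  rw [hitems]
  simp only [List.foldl, PySem.Str.toList_replace, PySem.Str.toList_upper, PySem.Chars.upper,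
    String.toList_ofList, replace_single]
  exact (staged_eq s.toList).symm
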